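-- pv_equiv track=rewrite | github.com/Canahmetozguven/crew-camufox | src/validation/content_validator.py | _detect_source_type
-- ===== SOURCE A (Python) =====
-- def _detect_source_type(source: str, domain: str) -> str:
--     """Detect the type of source"""
--
--     source_lower = source.lower()
--
--     if any(indicator in domain for indicator in ['.edu', 'arxiv', 'pubmed', 'ieee']):
--         return 'academic'
--     elif '.gov' in domain:
--         return 'government'
--     elif any(indicator in source_lower for indicator in ['journal', 'peer-reviewed', 'published']):
--         return 'academic'
--     elif any(indicator in source_lower for indicator in ['news', 'report', 'article']):
--         return 'news'
--     elif any(indicator in source_lower for indicator in ['blog', 'opinion', 'personal']):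
--         return 'blog'
--     else:
--         return 'unknown'
-- ===== SOURCE B (Python) =====
-- def _detect_source_type(source: str, domain: str) -> str:
--     """Detect the source type by scoring: every indicator carries a priority,
--     the answer is the label of the best (minimum) priority among all matches."""
--     source_lower = source.lower()
--     flat = [
--         (domain, '.edu', 0), (domain, 'arxiv', 0), (domain, 'pubmed', 0), (domain, 'ieee', 0),
--         (domain, '.gov', 1),
--         (source_lower, 'journal', 2), (source_lower, 'peer-reviewed', 2), (source_lower, 'published', 2),
--         (source_lower, 'news', 3), (source_lower, 'report', 3), (source_lower, 'article', 3),
--         (source_lower, 'blog', 4), (source_lower, 'opinion', 4), (source_lower, 'personal', 4),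
--     ]
--     labels = ['academic', 'government', 'academic', 'news', 'blog', 'unknown']
--     best = min((prio for field, ind, prio in flat if ind in field), default=5)
--     return labels[best]
-- ===== Notes on version B (the rewrite author's own statement) =====
-- stated objective: alternative
-- what changed: Replaced the short-circuiting if/elif chain with a scoring pass: every indicator carries a numeric priority, B computes the minimum priority over ALL matching indicators and maps it back to a label, instead of returning at the first matching group.
import Mathlib
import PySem

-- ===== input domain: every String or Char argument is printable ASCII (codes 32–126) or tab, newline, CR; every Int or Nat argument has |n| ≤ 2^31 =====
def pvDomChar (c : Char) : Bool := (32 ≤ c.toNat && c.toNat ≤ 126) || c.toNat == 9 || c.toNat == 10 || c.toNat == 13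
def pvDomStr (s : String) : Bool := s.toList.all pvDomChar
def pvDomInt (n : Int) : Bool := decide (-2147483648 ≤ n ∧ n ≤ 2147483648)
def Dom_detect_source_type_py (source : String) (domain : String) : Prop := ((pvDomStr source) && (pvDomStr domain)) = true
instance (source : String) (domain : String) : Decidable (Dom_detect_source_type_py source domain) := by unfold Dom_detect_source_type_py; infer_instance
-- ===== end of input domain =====

-- B replaces A's short-circuiting if/elif chain by a scoring pass: each indicator carries a priority, B takes the minimum priority over all matches (alternative decomposition, same cost).


-- ===== PORT A =====
def detect_source_type_py (source : String) (domain : String) : String :=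
  let source_lower := PySem.Str.lower source
  if ([".edu", "arxiv", "pubmed", "ieee"].any fun indicator => PySem.Str.isIn indicator domain) then
    "academic"
  else if PySem.Str.isIn ".gov" domain then
    "government"
  else if (["journal", "peer-reviewed", "published"].any fun indicator => PySem.Str.isIn indicator source_lower) then
    "academic"
  else if (["news", "report", "article"].any fun indicator => PySem.Str.isIn indicator source_lower) then
    "news"
  else if (["blog", "opinion", "personal"].any fun indicator => PySem.Str.isIn indicator source_lower) then
    "blog"
  else
    "unknown"

-- ===== PORT B =====
def detect_source_type_py_alt (source : String) (domain : String) : String :=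
  let source_lower := PySem.Str.lower source
  let flat : List (String × String × Int) :=
    [ (domain, ".edu", 0), (domain, "arxiv", 0), (domain, "pubmed", 0), (domain, "ieee", 0),
      (domain, ".gov", 1),
      (source_lower, "journal", 2), (source_lower, "peer-reviewed", 2), (source_lower, "published", 2),
      (source_lower, "news", 3), (source_lower, "report", 3), (source_lower, "article", 3),
      (source_lower, "blog", 4), (source_lower, "opinion", 4), (source_lower, "personal", 4) ]
  let labels : List String := ["academic", "government", "academic", "news", "blog", "unknown"]
  -- min(<generator of matching priorities>, default=5): a min-fold starting from 5
  let best : Int :=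
    flat.foldl (fun acc r => if PySem.Str.isIn r.2.1 r.1 then min acc r.2.2 else acc) 5
  (PySem.List.pyGet? labels best).getD ""

-- ===== PRECONDITION & SPEC =====
def Spec_detect_source_type_py (source : String) (domain : String) (out : String) : Prop := out = detect_source_type_py_alt source domain
instance (source : String) (domain : String) (out : String) : Decidable (Spec_detect_source_type_py source domain out) := by unfold Spec_detect_source_type_py; infer_instance

-- ===== CLAIM (what is proved, stated in full; the proofs are below) =====
def Claim_equal_detect_source_type_py : Prop := ∀ (source : String) (domain : String), Dom_detect_source_type_py source domain → Spec_detect_source_type_py source domain (detect_source_type_py source domain)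

-- ===== LEMMAS AND PROOFS =====

-- proof-only abbreviations for B's rule table, label table and min-fold
def pvFlat (sl : String) (domain : String) : List (String × String × Int) :=
  [ (domain, ".edu", 0), (domain, "arxiv", 0), (domain, "pubmed", 0), (domain, "ieee", 0),
    (domain, ".gov", 1),
    (sl, "journal", 2), (sl, "peer-reviewed", 2), (sl, "published", 2),
    (sl, "news", 3), (sl, "report", 3), (sl, "article", 3),
    (sl, "blog", 4), (sl, "opinion", 4), (sl, "personal", 4) ]

def pvLabels : List String := ["academic", "government", "academic", "news", "blog", "unknown"]

def ruleMin (l : List (String × String × Int)) (a : Int) : Int :=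
  l.foldl (fun acc r => if PySem.Str.isIn r.2.1 r.1 then min acc r.2.2 else acc) a

theorem alt_eq (source domain : String) :
    detect_source_type_py_alt source domain =
      (PySem.List.pyGet? pvLabels (ruleMin (pvFlat (PySem.Str.lower source) domain) 5)).getD "" := rfl

theorem ruleMin_le_init (l : List (String × String × Int)) (a : Int) : ruleMin l a ≤ a := by
  induction l generalizing a with
  | nil => simp [ruleMin]
  | cons r rest ih =>
    simp only [ruleMin, List.foldl_cons]
    by_cases h : PySem.Str.isIn r.2.1 r.1 = true
    · simp only [h, if_true]
      exact le_trans (ih (min a r.2.2)) (min_le_left _ _)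
    · simp only [h]
      exact ih a

theorem ruleMin_le (l : List (String × String × Int)) (a : Int) (r : String × String × Int)
    (hr : r ∈ l) (hm : PySem.Str.isIn r.2.1 r.1 = true) : ruleMin l a ≤ r.2.2 := by
  induction l generalizing a with
  | nil => cases hr
  | cons s rest ih =>
    rcases List.mem_cons.mp hr with rfl | hmem
    · simp only [ruleMin, List.foldl_cons, hm, if_true]
      exact le_trans (ruleMin_le_init rest _) (min_le_right _ _)
    · simp only [ruleMin, List.foldl_cons]
      by_cases h : PySem.Str.isIn s.2.1 s.1 = true
      · simp only [h, if_true]; exact ih _ hmem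
      · simp only [h]; exact ih _ hmem

theorem le_ruleMin (l : List (String × String × Int)) (a m : Int)
    (h : ∀ r ∈ l, PySem.Str.isIn r.2.1 r.1 = true → m ≤ r.2.2) (ha : m ≤ a) :
    m ≤ ruleMin l a := by
  induction l generalizing a with
  | nil => simpa [ruleMin] using ha
  | cons r rest ih =>
    simp only [ruleMin, List.foldl_cons]
    by_cases hc : PySem.Str.isIn r.2.1 r.1 = true
    · simp only [hc, if_true]
      exact ih _ (fun s hs => h s (List.mem_cons_of_mem _ hs))
        (le_min ha (h r List.mem_cons_self hc))
    · simp only [hc]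
      exact ih _ (fun s hs => h s (List.mem_cons_of_mem _ hs)) ha

-- ===== VERDICT (by name: the statement is the Claim_ definition above) =====
theorem detect_source_type_py_spec : Claim_equal_detect_source_type_py := by
  intro source domain _
  unfold Spec_detect_source_type_py
  rw [alt_eq]
  unfold detect_source_type_py
  simp only [List.any_cons, List.any_nil, Bool.or_false]
  generalize PySem.Str.lower source = sl
  split_ifs with h1 h2 h3 h4 h5
  -- academic by domain: best = 0
  · have hle : ruleMin (pvFlat sl domain) 5 ≤ 0 := by
      rcases Bool.or_eq_true_iff.mp h1 with h | h
      · exact ruleMin_le _ _ (domain, ".edu", 0) (by simp [pvFlat]) h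
      rcases Bool.or_eq_true_iff.mp h with h | h
      · exact ruleMin_le _ _ (domain, "arxiv", 0) (by simp [pvFlat]) h
      rcases Bool.or_eq_true_iff.mp h with h | h
      · exact ruleMin_le _ _ (domain, "pubmed", 0) (by simp [pvFlat]) h
      · exact ruleMin_le _ _ (domain, "ieee", 0) (by simp [pvFlat]) h
    have hge : (0 : Int) ≤ ruleMin (pvFlat sl domain) 5 := by
      refine le_ruleMin _ _ _ ?_ (by norm_num)
      intro r hr _
      simp only [pvFlat, List.mem_cons, List.not_mem_nil, or_false] at hr
      rcases hr with rfl | rfl | rfl | rfl | rfl | rfl | rfl | rfl | rfl | rfl | rfl | rfl | rfl | rfl <;> norm_num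
    rw [le_antisymm hle hge]; decide
  -- government: best = 1
  · simp only [Bool.or_eq_true_iff, not_or, Bool.not_eq_true] at h1
    have hle : ruleMin (pvFlat sl domain) 5 ≤ 1 :=
      ruleMin_le _ _ (domain, ".gov", 1) (by simp [pvFlat]) h2
    have hge : (1 : Int) ≤ ruleMin (pvFlat sl domain) 5 := by
      refine le_ruleMin _ _ _ ?_ (by norm_num)
      intro r hr hm
      simp only [pvFlat, List.mem_cons, List.not_mem_nil, or_false] at hr
      rcases hr with rfl | rfl | rfl | rfl | rfl | rfl | rfl | rfl | rfl | rfl | rfl | rfl | rfl | rfl <;>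
        first
          | (exfalso; simp_all; done)
          | norm_num
    rw [le_antisymm hle hge]; decide
  -- academic by source: best = 2
  · simp only [Bool.or_eq_true_iff, not_or, Bool.not_eq_true] at h1
    have hle : ruleMin (pvFlat sl domain) 5 ≤ 2 := by
      rcases Bool.or_eq_true_iff.mp h3 with h | h
      · exact ruleMin_le _ _ (sl, "journal", 2) (by simp [pvFlat]) h
      rcases Bool.or_eq_true_iff.mp h with h | h
      · exact ruleMin_le _ _ (sl, "peer-reviewed", 2) (by simp [pvFlat]) h
      · exact ruleMin_le _ _ (sl, "published", 2) (by simp [pvFlat]) h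
    have hge : (2 : Int) ≤ ruleMin (pvFlat sl domain) 5 := by
      refine le_ruleMin _ _ _ ?_ (by norm_num)
      intro r hr hm
      simp only [pvFlat, List.mem_cons, List.not_mem_nil, or_false] at hr
      rcases hr with rfl | rfl | rfl | rfl | rfl | rfl | rfl | rfl | rfl | rfl | rfl | rfl | rfl | rfl <;>
        first
          | (exfalso; simp_all; done)
          | norm_num
    rw [le_antisymm hle hge]; decide
  -- news: best = 3
  · simp only [Bool.or_eq_true_iff, not_or, Bool.not_eq_true] at h1 h3
    have hle : ruleMin (pvFlat sl domain) 5 ≤ 3 := by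
      rcases Bool.or_eq_true_iff.mp h4 with h | h
      · exact ruleMin_le _ _ (sl, "news", 3) (by simp [pvFlat]) h
      rcases Bool.or_eq_true_iff.mp h with h | h
      · exact ruleMin_le _ _ (sl, "report", 3) (by simp [pvFlat]) h
      · exact ruleMin_le _ _ (sl, "article", 3) (by simp [pvFlat]) h
    have hge : (3 : Int) ≤ ruleMin (pvFlat sl domain) 5 := by
      refine le_ruleMin _ _ _ ?_ (by norm_num)
      intro r hr hm
      simp only [pvFlat, List.mem_cons, List.not_mem_nil, or_false] at hr
      rcases hr with rfl | rfl | rfl | rfl | rfl | rfl | rfl | rfl | rfl | rfl | rfl | rfl | rfl | rfl <;>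
        first
          | (exfalso; simp_all; done)
          | norm_num
    rw [le_antisymm hle hge]; decide
  -- blog: best = 4
  · simp only [Bool.or_eq_true_iff, not_or, Bool.not_eq_true] at h1 h3 h4
    have hle : ruleMin (pvFlat sl domain) 5 ≤ 4 := by
      rcases Bool.or_eq_true_iff.mp h5 with h | h
      · exact ruleMin_le _ _ (sl, "blog", 4) (by simp [pvFlat]) h
      rcases Bool.or_eq_true_iff.mp h with h | h
      · exact ruleMin_le _ _ (sl, "opinion", 4) (by simp [pvFlat]) h
      · exact ruleMin_le _ _ (sl, "personal", 4) (by simp [pvFlat]) h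
    have hge : (4 : Int) ≤ ruleMin (pvFlat sl domain) 5 := by
      refine le_ruleMin _ _ _ ?_ (by norm_num)
      intro r hr hm
      simp only [pvFlat, List.mem_cons, List.not_mem_nil, or_false] at hr
      rcases hr with rfl | rfl | rfl | rfl | rfl | rfl | rfl | rfl | rfl | rfl | rfl | rfl | rfl | rfl <;>
        first
          | (exfalso; simp_all; done)
          | norm_num
    rw [le_antisymm hle hge]; decide
  -- unknown: best = 5
  · simp only [Bool.or_eq_true_iff, not_or, Bool.not_eq_true] at h1 h3 h4 h5
    have hle : ruleMin (pvFlat sl domain) 5 ≤ 5 := ruleMin_le_init _ _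
    have hge : (5 : Int) ≤ ruleMin (pvFlat sl domain) 5 := by
      refine le_ruleMin _ _ _ ?_ (by norm_num)
      intro r hr hm
      simp only [pvFlat, List.mem_cons, List.not_mem_nil, or_false] at hr
      rcases hr with rfl | rfl | rfl | rfl | rfl | rfl | rfl | rfl | rfl | rfl | rfl | rfl | rfl | rfl <;>
        (exfalso; simp_all)
    rw [le_antisymm hle hge]; decide
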